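-- pv_equiv track=rewrite | github.com/cyberklin/adventofcode | 2023/day14/14_2.py | calc_load
-- ===== SOURCE A (Python) =====
-- def calc_load(m):
--     r,c = len(m),len(m[0])
--     load = 0
--     fingerprint = ''
--
--     for j in range(0, c):
--         for i in range(r - 1, -1, -1):
--             if m[i][j] == 'O':
--                 load += r - i
--                 fingerprint += str(i) + ',' + str(j) + ','
--
--     return load, fingerprint
-- ===== SOURCE B (Python) =====
-- def calc_load(m):
--     # One row-major pass that buckets each 'O' chunk per column (and sums the
--     # load as it goes); the fingerprint is the reversed buckets joined in
--     # column order.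
--     r, c = len(m), len(m[0])
--     load = 0
--     cols = {}
--     for i, row in enumerate(m):
--         for j in range(c):
--             if row[j] == 'O':
--                 load += r - i
--                 cols.setdefault(j, []).append(str(i) + ',' + str(j) + ',')
--     fingerprint = ''.join(part for j in range(c) for part in reversed(cols.get(j, [])))
--     return load, fingerprint
-- ===== Notes on version B (the rewrite author's own statement) =====
-- stated objective: alternative
-- what changed: A walks the grid column-major with the row index counting down and concatenates the fingerprint cell by cell; B makes one row-major pass collecting each 'O' chunk into a per-column bucket (and summing the load as it goes), then joins the reversed buckets.
import Mathlib
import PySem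

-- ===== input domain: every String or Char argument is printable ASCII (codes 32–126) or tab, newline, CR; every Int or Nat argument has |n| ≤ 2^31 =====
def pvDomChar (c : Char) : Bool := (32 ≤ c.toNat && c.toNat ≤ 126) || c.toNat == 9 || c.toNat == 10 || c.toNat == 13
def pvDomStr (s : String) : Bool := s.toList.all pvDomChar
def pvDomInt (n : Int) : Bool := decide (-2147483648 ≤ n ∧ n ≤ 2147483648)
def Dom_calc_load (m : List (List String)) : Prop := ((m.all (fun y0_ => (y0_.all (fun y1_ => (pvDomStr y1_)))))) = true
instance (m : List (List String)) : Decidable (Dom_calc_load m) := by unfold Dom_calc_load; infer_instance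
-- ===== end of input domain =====

-- B replaces A's column-major double scan (string built cell by cell) by one
-- row-major pass that buckets the 'O' chunks per column in a dict and joins
-- the reversed buckets at the end; objective: alternative decomposition.

-- ===== PORT A =====
def calc_load (m : List (List String)) : Int × String :=
  let r : Int := m.length
  let c : Int := ((PySem.List.pyGetD m 0 []).length : Int)
  (PySem.List.pyRange 0 c 1).foldl (fun acc j =>
    (PySem.List.pyRange (r - 1) (-1) (-1)).foldl (fun acc i =>
      if PySem.List.pyGetD (PySem.List.pyGetD m i []) j "" = "O" then
        (acc.1 + (r - i), acc.2 ++ (PySem.Int.toStr i ++ "," ++ PySem.Int.toStr j ++ ","))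
      else acc) acc) ((0 : Int), "")

-- ===== PORT B =====
def calc_load_alt (m : List (List String)) : Int × String :=
  let r : Int := m.length
  let c : Int := ((PySem.List.pyGetD m 0 []).length : Int)
  let st := (PySem.List.enumerate m 0).foldl (fun (st : Int × PySem.Dict Int (List String)) p =>
    (PySem.List.pyRange 0 c 1).foldl (fun st j =>
      if PySem.List.pyGetD p.2 j "" = "O" then
        (st.1 + (r - p.1), st.2.modify j [] (· ++ [PySem.Int.toStr p.1 ++ "," ++ PySem.Int.toStr j ++ ","]))
      else st) st) ((0 : Int), PySem.Dict.empty)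
  (st.1, PySem.Str.join "" ((PySem.List.pyRange 0 c 1).flatMap (fun j => (st.2.getD j []).reverse)))

-- ===== PRECONDITION & SPEC =====
-- Pre_ excludes exactly the inputs on which the Python A raises IndexError:
-- the empty grid (len(m[0])) and grids with a row shorter than row 0.
def Pre_calc_load (m : List (List String)) : Prop :=
  m ≠ [] ∧ ∀ row ∈ m, (PySem.List.pyGetD m 0 []).length ≤ row.length
instance (m : List (List String)) : Decidable (Pre_calc_load m) := by unfold Pre_calc_load; infer_instance
def pvWitness_calc_load : List (List String) := [["O", "."], [".", "O"]]

def Spec_calc_load (m : List (List String)) (out : Int × String) : Prop := out = calc_load_alt m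
instance (m : List (List String)) (out : Int × String) : Decidable (Spec_calc_load m out) := by unfold Spec_calc_load; infer_instance

-- ===== CLAIM (what is proved, stated in full; the proofs are below) =====
def Claim_equal_calc_load : Prop := ∀ (m : List (List String)), Dom_calc_load m → Pre_calc_load m → Spec_calc_load m (calc_load m)

-- ===== LEMMAS AND PROOFS =====

-- proof-side abbreviations
def pvChunk (i j : Int) : String := PySem.Int.toStr i ++ "," ++ PySem.Int.toStr j ++ ","
def pvR (m : List (List String)) : List Int := PySem.List.pyRange 0 (m.length : Int) 1
def pvC (m : List (List String)) : List Int :=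
  PySem.List.pyRange 0 ((PySem.List.pyGetD m 0 []).length : Int) 1
def pvColAsc (m : List (List String)) (j : Int) : List String :=
  ((pvR m).filter (fun i => decide (PySem.List.pyGetD (PySem.List.pyGetD m i []) j "" = "O"))).map
    (fun i => pvChunk i j)
def pvJ (l : List String) : String := PySem.Str.join "" l

-- a conditional loop updating both components of a pair is two loops
theorem pvCondfoldPair {α β γ : Type} (P : γ → Prop) [DecidablePred P]
    (F : α → γ → α) (G : β → γ → β) :
    ∀ (l : List γ) (ab : α × β),
      l.foldl (fun s e => if P e then (F s.1 e, G s.2 e) else s) ab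
        = (l.foldl (fun a e => if P e then F a e else a) ab.1,
           l.foldl (fun b e => if P e then G b e else b) ab.2) := by
  intro l
  induction l with
  | nil => intro ab; simp
  | cons x t ih => intro ab; by_cases h : P x <;> simp [h, ih]

-- the nested (grid) version of the previous lemma
theorem pvNestedCondfoldPair {α β γ δ : Type} (P : γ → δ → Prop) [∀ i j, Decidable (P i j)]
    (F : α → γ → δ → α) (G : β → γ → δ → β) (li : δ → List γ) :
    ∀ (lo : List δ) (ab : α × β),
      lo.foldl (fun acc j => (li j).foldl
          (fun acc i => if P i j then (F acc.1 i j, G acc.2 i j) else acc) acc) ab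
        = (lo.foldl (fun a j => (li j).foldl (fun a i => if P i j then F a i j else a) a) ab.1,
           lo.foldl (fun b j => (li j).foldl (fun b i => if P i j then G b i j else b) b) ab.2) := by
  intro lo
  induction lo with
  | nil => intro ab; simp
  | cons x t ih =>
    intro ab
    simp only [List.foldl_cons]
    rw [ih]
    have h := pvCondfoldPair (fun i => P i x) (fun a i => F a i x) (fun b i => G b i x) (li x) ab
    rw [h]

-- a conditional accumulating loop is a sum
theorem pvCondfoldSum {γ : Type} (P : γ → Prop) [DecidablePred P] (f : γ → Int) :
    ∀ (l : List γ) (a : Int),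
      l.foldl (fun a x => if P x then a + f x else a) a
        = a + (l.map (fun x => if P x then f x else 0)).sum := by
  intro l
  induction l with
  | nil => intro a; simp
  | cons x t ih => intro a; by_cases h : P x <;> simp [h, ih] <;> ring

theorem pvFoldlSum {γ : Type} (f : γ → Int) :
    ∀ (l : List γ) (a : Int), l.foldl (fun a x => a + f x) a = a + (l.map f).sum := by
  intro l
  induction l with
  | nil => intro a; simp
  | cons x t ih => intro a; simp [ih]; ring

theorem pvSumSwap (l1 l2 : List Int) (g : Int → Int → Int) :
    (l1.map (fun x => (l2.map (fun y => g x y)).sum)).sum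
      = (l2.map (fun y => (l1.map (fun x => g x y)).sum)).sum := by
  induction l1 with
  | nil => simp
  | cons a t ih =>
    simp only [List.map_cons, List.sum_cons, ih]
    rw [PySem.List.sum_map_add_int]

theorem pvFoldlCongr {γ δ : Type} (l : List γ) (a : δ) (f g : δ → γ → δ) (h : f = g) :
    l.foldl f a = l.foldl g a := by rw [h]

-- string-join bookkeeping
theorem pvIntercalateNil {α : Type} (l : List (List α)) : List.intercalate [] l = l.flatten := by
  induction l with
  | nil => rfl
  | cons a t ih =>
    cases t with
    | nil => simp [List.intercalate]
    | cons b t2 =>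
      simp [List.intercalate] at ih ⊢
      simpa [List.cons_append] using ih

theorem pvJoinNil : pvJ [] = "" := by
  simp [pvJ, PySem.Str.join, PySem.Chars.join, List.intercalate]

theorem pvJoinCons (a : String) (l : List String) : pvJ (a :: l) = a ++ pvJ l := by
  simp [pvJ, PySem.Str.join, PySem.Chars.join, pvIntercalateNil, String.ofList_append]

theorem pvJoinAppend (l1 l2 : List String) : pvJ (l1 ++ l2) = pvJ l1 ++ pvJ l2 := by
  induction l1 with
  | nil => simp [pvJoinNil]
  | cons a t ih => simp [pvJoinCons, ih, String.append_assoc]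

theorem pvJoinFlatMap {γ : Type} (l : List γ) (g : γ → List String) :
    pvJ (l.flatMap g) = pvJ (l.map (fun x => pvJ (g x))) := by
  induction l with
  | nil => simp
  | cons a t ih => simp [pvJoinCons, pvJoinAppend, ih]

-- a conditional string-appending loop is a join over the filtered list
theorem pvCondfoldStr {γ : Type} (P : γ → Prop) [DecidablePred P] (f : γ → String) :
    ∀ (l : List γ) (s : String),
      l.foldl (fun s x => if P x then s ++ f x else s) s
        = s ++ pvJ ((l.filter (fun x => decide (P x))).map f) := by
  intro l
  induction l with
  | nil => intro s; simp [pvJoinNil]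
  | cons a t ih =>
    intro s
    by_cases h : P a <;> simp [h, ih, pvJoinCons, String.append_assoc]

theorem pvFoldlStr {γ : Type} (f : γ → String) :
    ∀ (l : List γ) (s : String),
      l.foldl (fun s x => s ++ f x) s = s ++ pvJ (l.map f) := by
  intro l
  induction l with
  | nil => intro s; simp [pvJoinNil]
  | cons a t ih => intro s; simp [ih, pvJoinCons, String.append_assoc]

-- countdown range is the reversed ascending range
theorem pvCountdown (m : List (List String)) :
    PySem.List.pyRange ((m.length : Int) - 1) (-1) (-1) = (pvR m).reverse := by
  rw [PySem.List.pyRange_neg_one_eq_reverse]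
  norm_num [pvR]

-- flatMap congruence and a flatMap of conditional singletons
theorem pvFlatMapCongr {γ δ : Type} (l : List γ) (f g : γ → List δ)
    (h : ∀ x ∈ l, f x = g x) : l.flatMap f = l.flatMap g := by
  induction l with
  | nil => rfl
  | cons a t ih =>
    simp only [List.flatMap_cons]
    rw [h a (List.mem_cons_self), ih (fun x hx => h x (List.mem_cons_of_mem a hx))]

theorem pvFlatMapIte {γ δ : Type} (q : γ → Bool) (g : γ → δ) (l : List γ) :
    l.flatMap (fun x => if q x then [g x] else []) = (l.filter q).map g := by
  induction l with
  | nil => rfl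
  | cons a t ih => by_cases h : q a <;> simp [h, ih]

theorem pvFlatMapMap {α β γ : Type} (f : α → β) (g : β → List γ) (l : List α) :
    (l.map f).flatMap g = l.flatMap (fun x => g (f x)) := by
  induction l with
  | nil => rfl
  | cons a t ih => simp [ih]

-- the per-row bucket update, seen from one key j
theorem pvBucketCol {ν : Type} (P : Int → Prop) [DecidablePred P] (g : Int → ν) (j : Int) :
    ∀ (l : List Int) (d : PySem.Dict Int (List ν)),
      (l.foldl (fun d j' => if P j' then d.modify j' [] (· ++ [g j']) else d) d).getD j []
        = d.getD j [] ++ (l.filter (fun j' => decide (P j') && (j' == j))).map g := by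
  intro l
  induction l with
  | nil => intro d; simp
  | cons a t ih =>
    intro d
    by_cases h : P a
    · rw [List.foldl_cons, if_pos h, ih]
      by_cases hj : j = a
      · subst hj
        simp [h]
      · simp [h, PySem.Dict.getD_modify, hj, Ne.symm hj]
    · simp [List.foldl_cons, h, ih]

-- the whole bucket-building loop, seen from one key j
theorem pvBucketRows (lC : List Int) (j : Int) :
    ∀ (L : List (Int × List String)) (d : PySem.Dict Int (List String)),
      (L.foldl (fun d p => lC.foldl (fun d j' =>
          if PySem.List.pyGetD p.2 j' "" = "O" then
            d.modify j' [] (· ++ [PySem.Int.toStr p.1 ++ "," ++ PySem.Int.toStr j' ++ ","])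
          else d) d) d).getD j []
        = d.getD j [] ++ L.flatMap (fun p =>
            (lC.filter (fun j' => decide (PySem.List.pyGetD p.2 j' "" = "O") && (j' == j))).map
              (fun j' => PySem.Int.toStr p.1 ++ "," ++ PySem.Int.toStr j' ++ ",")) := by
  intro L
  induction L with
  | nil => intro d; simp
  | cons p t ih =>
    intro d
    rw [List.foldl_cons, ih,
      pvBucketCol (fun j' => PySem.List.pyGetD p.2 j' "" = "O")
        (fun j' => PySem.Int.toStr p.1 ++ "," ++ PySem.Int.toStr j' ++ ",") j]
    simp [List.append_assoc]

theorem pvFilterKeyNil {γ : Type} [DecidableEq γ] (q : γ → Bool) (j : γ) :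
    ∀ (l : List γ), j ∉ l → l.filter (fun x => q x && (x == j)) = [] := by
  intro l
  induction l with
  | nil => intro _; rfl
  | cons a t ih =>
    intro h
    have ha : a ≠ j := fun he => h (he ▸ List.mem_cons_self)
    have ht : j ∉ t := fun ht' => h (List.mem_cons_of_mem a ht')
    simp [ha, ih ht]

theorem pvFilterKey {γ δ : Type} [DecidableEq γ] (q : γ → Bool) (g : γ → δ) (j : γ) :
    ∀ (l : List γ), l.Nodup → j ∈ l →
      (l.filter (fun x => q x && (x == j))).map g = if q j then [g j] else [] := by
  intro l
  induction l with
  | nil => intro _ h; cases h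
  | cons a t ih =>
    intro hnd hj
    rcases List.mem_cons.mp hj with he | ht
    · subst he
      have hnotin : j ∉ t := (List.nodup_cons.mp hnd).1
      by_cases hq : q j <;> simp [hq, pvFilterKeyNil q j t hnotin]
    · have ha : a ≠ j := fun he => ((List.nodup_cons.mp hnd).1 (he ▸ ht)).elim
      have h2 := ih (List.nodup_cons.mp hnd).2 ht
      simpa [List.filter_cons, ha] using h2

-- ===== the two sides in canonical form =====

theorem pvA_canon (m : List (List String)) :
    calc_load m
      = ((pvC m).foldl (fun a j => a + ((pvR m).map (fun i =>
            if PySem.List.pyGetD (PySem.List.pyGetD m i []) j "" = "O"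
            then (m.length : Int) - i else 0)).sum) 0,
         (pvC m).foldl (fun s j => s ++ pvJ ((pvColAsc m j).reverse)) "") := by
  have h := pvNestedCondfoldPair
    (P := fun (i : Int) (j : Int) => PySem.List.pyGetD (PySem.List.pyGetD m i []) j "" = "O")
    (F := fun (a : Int) (i : Int) (_ : Int) => a + ((m.length : Int) - i))
    (G := fun (b : String) (i : Int) (j : Int) =>
      b ++ (PySem.Int.toStr i ++ "," ++ PySem.Int.toStr j ++ ","))
    (li := fun _ => PySem.List.pyRange ((m.length : Int) - 1) (-1) (-1))
    (pvC m) ((0 : Int), "")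
  refine (h.trans ?_)
  refine Prod.ext ?_ ?_
  · -- load component
    refine (pvFoldlCongr _ _ _ _ ?_)
    funext a j
    rw [pvCondfoldSum (fun i => PySem.List.pyGetD (PySem.List.pyGetD m i []) j "" = "O")
        (fun i => (m.length : Int) - i), pvCountdown, List.map_reverse, List.sum_reverse]
  · -- fingerprint component
    refine (pvFoldlCongr _ _ _ _ ?_)
    funext s j
    refine (pvCondfoldStr (fun i => PySem.List.pyGetD (PySem.List.pyGetD m i []) j "" = "O")
        (fun i => pvChunk i j) _ s).trans ?_
    rw [pvCountdown, List.filter_reverse, List.map_reverse]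
    rfl

theorem pvB_canon (m : List (List String)) :
    calc_load_alt m
      = ((pvR m).foldl (fun a i => a + ((pvC m).map (fun j =>
            if PySem.List.pyGetD (PySem.List.pyGetD m i []) j "" = "O"
            then (m.length : Int) - i else 0)).sum) 0,
         pvJ ((pvC m).flatMap (fun j => (pvColAsc m j).reverse))) := by
  have h := pvNestedCondfoldPair
    (P := fun (j : Int) (p : Int × List String) => PySem.List.pyGetD p.2 j "" = "O")
    (F := fun (a : Int) (_ : Int) (p : Int × List String) => a + ((m.length : Int) - p.1))
    (G := fun (d : PySem.Dict Int (List String)) (j : Int) (p : Int × List String) =>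
      d.modify j [] (· ++ [PySem.Int.toStr p.1 ++ "," ++ PySem.Int.toStr j ++ ","]))
    (li := fun _ => PySem.List.pyRange 0 ((PySem.List.pyGetD m 0 []).length : Int) 1)
    (PySem.List.enumerate m 0) ((0 : Int), PySem.Dict.empty)
  show (_, _) = _
  rw [h]
  have henum : PySem.List.enumerate m 0
      = (pvR m).map (fun i => (i, PySem.List.pyGetD m i [])) := by
    have := PySem.List.enumerate_eq_map_pyRange m ([] : List String)
    simpa [pvR] using this
  refine Prod.ext ?_ ?_
  · -- load component
    show (PySem.List.enumerate m 0).foldl _ 0 = _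
    rw [henum, List.foldl_map]
    refine (pvFoldlCongr _ _ _ _ ?_)
    funext a i
    exact pvCondfoldSum (fun j => PySem.List.pyGetD (PySem.List.pyGetD m i []) j "" = "O")
      (fun _ => (m.length : Int) - i) (pvC m) a
  · -- fingerprint component
    show PySem.Str.join "" _ = _
    refine congrArg (fun l => pvJ l) ?_
    refine pvFlatMapCongr _ _ _ ?_
    intro j hj
    refine congrArg List.reverse ?_
    rw [henum, pvBucketRows]
    have hempty : (PySem.Dict.empty : PySem.Dict Int (List String)).getD j [] = [] := rfl
    rw [hempty, List.nil_append, pvFlatMapMap]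
    refine (pvFlatMapCongr _ _ _ ?_).trans
      (pvFlatMapIte (fun i => decide (PySem.List.pyGetD (PySem.List.pyGetD m i []) j "" = "O"))
        (fun i => PySem.Int.toStr i ++ "," ++ PySem.Int.toStr j ++ ",") (pvR m))
    intro i _
    exact pvFilterKey
      (fun j' => decide (PySem.List.pyGetD (PySem.List.pyGetD m i []) j' "" = "O"))
      (fun j' => PySem.Int.toStr i ++ "," ++ PySem.Int.toStr j' ++ ",") j
      (PySem.List.pyRange 0 ((PySem.List.pyGetD m 0 []).length : Int) 1)
      (PySem.List.nodup_pyRange_one 0 _) hj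

-- ===== VERDICT (by name: the statement is the Claim_ definition above) =====
theorem calc_load_spec : Claim_equal_calc_load := by
  intro m _ _
  show calc_load m = calc_load_alt m
  rw [pvA_canon m, pvB_canon m]
  refine Prod.ext ?_ ?_
  · -- loads: swap the two summations
    show (pvC m).foldl _ 0 = (pvR m).foldl _ 0
    rw [pvFoldlSum, pvFoldlSum, Int.zero_add, Int.zero_add]
    exact pvSumSwap (pvC m) (pvR m) (fun j i =>
      if PySem.List.pyGetD (PySem.List.pyGetD m i []) j "" = "O" then (m.length : Int) - i else 0)
  · -- fingerprints: join of blocks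
    show (pvC m).foldl _ "" = pvJ _
    rw [pvFoldlStr (fun j => pvJ ((pvColAsc m j).reverse)) (pvC m) "", String.empty_append,
      pvJoinFlatMap]
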